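-- pv_equiv track=rewrite | github.com/logicalmodelin/LGMLtools | blog2022/blog20221216_blog_header/modifyImageForSubstanceInput.py | find_fit_size_power_of_2
-- ===== SOURCE A (Python) =====
-- TARGET_SIZES = [8192, 4096, 2048, 1024, 512, 256, 128, 64, 32, 16, 8, 4, 2, 1]
--
-- def find_fit_size_power_of_2(size: tuple[int, int], force_square: bool) -> tuple[int, int]:
--     w: int = -1
--     h: int = -1
--     for i in range(len(TARGET_SIZES) - 1):
--         if TARGET_SIZES[i] >= size[0] > TARGET_SIZES[i + 1]:
--             w = TARGET_SIZES[i]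
--             break
--     for i in range(len(TARGET_SIZES) - 1):
--         if TARGET_SIZES[i] >= size[1] > TARGET_SIZES[i + 1]:
--             h = TARGET_SIZES[i]
--             break
--     if force_square:
--         w = max(w, h)
--         h = w
--     return w, h
--
--     w, h = size
--     if w == h:
--         return size
--     if w > h:
--         return w, w
--     else:
--         return h, h
-- ===== SOURCE B (Python) =====
-- def find_fit_size_power_of_2(size: tuple[int, int], force_square: bool) -> tuple[int, int]:
--     def fit(d: int) -> int:
--         return 1 << (d - 1).bit_length() if 1 < d <= 8192 else -1
--     w = fit(size[0])
--     h = fit(size[1])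
--     if force_square:
--         w = h = max(w, h)
--     return w, h
-- ===== Notes on version B (the rewrite author's own statement) =====
-- stated objective: idiomatic
-- what changed: Replaces the two scans over the TARGET_SIZES table with a closed-form bit-length computation (1 << (d-1).bit_length() for 1 < d <= 8192, else -1).
import Mathlib
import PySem

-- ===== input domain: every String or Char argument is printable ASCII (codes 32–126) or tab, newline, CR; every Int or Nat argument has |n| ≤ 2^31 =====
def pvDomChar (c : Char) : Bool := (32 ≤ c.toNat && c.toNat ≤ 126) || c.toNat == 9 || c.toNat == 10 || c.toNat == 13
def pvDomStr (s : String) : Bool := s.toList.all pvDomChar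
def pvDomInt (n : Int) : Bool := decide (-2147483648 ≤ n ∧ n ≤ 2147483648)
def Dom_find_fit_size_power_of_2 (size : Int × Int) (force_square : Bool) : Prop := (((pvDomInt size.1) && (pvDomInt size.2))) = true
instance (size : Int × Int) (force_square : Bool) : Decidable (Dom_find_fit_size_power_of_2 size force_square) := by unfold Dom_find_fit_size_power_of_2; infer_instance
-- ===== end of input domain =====

-- B replaces A's two table scans with a closed-form bit-length computation (idiomatic; same behaviour).

-- ===== PORT A =====
def TARGET_SIZES : List Int := [8192, 4096, 2048, 1024, 512, 256, 128, 64, 32, 16, 8, 4, 2, 1]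

-- A's for-loop with break, scanning consecutive pairs (TARGET_SIZES[i], TARGET_SIZES[i+1]);
-- returns -1 when no pair matches (w/h keep their initial value).
def pvScanFit (d : Int) : List Int → Int
  | a :: b :: rest => if a ≥ d ∧ d > b then a else pvScanFit d (b :: rest)
  | _ => -1

def find_fit_size_power_of_2 (size : Int × Int) (force_square : Bool) : Int × Int :=
  let w : Int := pvScanFit size.1 TARGET_SIZES
  let h : Int := pvScanFit size.2 TARGET_SIZES
  if force_square then
    let w' := max w h
    (w', w')
  else (w, h)

-- ===== PORT B =====
-- 1 << (d-1).bit_length() if 1 < d <= 8192 else -1; Python's int.bit_length = Nat.size here.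
def pvBitFit (d : Int) : Int :=
  if 1 < d ∧ d ≤ 8192 then (2 : Int) ^ (Nat.size (d - 1).toNat) else -1

def find_fit_size_power_of_2_alt (size : Int × Int) (force_square : Bool) : Int × Int :=
  let w : Int := pvBitFit size.1
  let h : Int := pvBitFit size.2
  if force_square then
    let m := max w h
    (m, m)
  else (w, h)

-- ===== PRECONDITION & SPEC =====
def Spec_find_fit_size_power_of_2 (size : Int × Int) (force_square : Bool) (out : Int × Int) : Prop := out = find_fit_size_power_of_2_alt size force_square
instance (size : Int × Int) (force_square : Bool) (out : Int × Int) : Decidable (Spec_find_fit_size_power_of_2 size force_square out) := by unfold Spec_find_fit_size_power_of_2; infer_instance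

-- ===== CLAIM (what is proved, stated in full; the proofs are below) =====
def Claim_equal_find_fit_size_power_of_2 : Prop := ∀ (size : Int × Int) (force_square : Bool), Dom_find_fit_size_power_of_2 size force_square → Spec_find_fit_size_power_of_2 size force_square (find_fit_size_power_of_2 size force_square)

-- ===== LEMMAS AND PROOFS =====

theorem pv_size_eq {n k : Nat} (h1 : 2 ^ k ≤ n) (h2 : n < 2 ^ (k + 1)) :
    Nat.size n = k + 1 := by
  have hle : Nat.size n ≤ k + 1 := Nat.size_le.mpr h2
  have hlt : k < Nat.size n := Nat.lt_size.mpr h1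
  omega

-- on the interval 2^k < d ≤ 2^(k+1), B's bit trick yields 2^(k+1)
theorem pv_bitFit_interval {d : Int} {k : Nat} (hk : k ≤ 12)
    (h1 : (2 : Int) ^ k < d) (h2 : d ≤ (2 : Int) ^ (k + 1)) :
    pvBitFit d = (2 : Int) ^ (k + 1) := by
  have hpow : (2 : Int) ^ k ≥ 1 := one_le_pow₀ (by norm_num)
  have hcond : 1 < d ∧ d ≤ 8192 := by
    constructor
    · omega
    · calc d ≤ (2 : Int) ^ (k + 1) := h2
        _ ≤ (2 : Int) ^ 13 := by
            apply pow_le_pow_right₀ (by norm_num); omega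
        _ = 8192 := by norm_num
  have hlo : 2 ^ k ≤ (d - 1).toNat := by
    have : ((2 : Int) ^ k) = ((2 ^ k : Nat) : Int) := by push_cast; ring
    omega
  have hhi : (d - 1).toNat < 2 ^ (k + 1) := by
    have : ((2 : Int) ^ (k + 1)) = ((2 ^ (k + 1) : Nat) : Int) := by push_cast; ring
    omega
  simp only [pvBitFit, if_pos hcond, pv_size_eq hlo hhi]

theorem pv_scan_step (d a b : Int) (rest : List Int) :
    pvScanFit d (a :: b :: rest) = if a ≥ d ∧ d > b then a else pvScanFit d (b :: rest) := rfl

theorem pv_scan_last (d a : Int) : pvScanFit d [a] = -1 := rfl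

set_option maxHeartbeats 1000000 in
theorem pv_fit_eq (d : Int) : pvScanFit d TARGET_SIZES = pvBitFit d := by
  by_cases hmid : 1 < d ∧ d ≤ 8192
  · -- 1 < d ≤ 8192: d lies in exactly one interval (2^k, 2^(k+1)]
    by_cases c12 : (4096 : Int) < d
    · rw [TARGET_SIZES, pv_scan_step, if_pos (by omega),
          pv_bitFit_interval (k := 12) (by norm_num) (by norm_num; omega) (by norm_num; omega)]
      norm_num
    by_cases c11 : (2048 : Int) < d
    · rw [TARGET_SIZES, pv_scan_step, if_neg (by omega), pv_scan_step, if_pos (by omega),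
          pv_bitFit_interval (k := 11) (by norm_num) (by norm_num; omega) (by norm_num; omega)]
      norm_num
    by_cases c10 : (1024 : Int) < d
    · rw [TARGET_SIZES, pv_scan_step, if_neg (by omega), pv_scan_step, if_neg (by omega), pv_scan_step, if_pos (by omega),
          pv_bitFit_interval (k := 10) (by norm_num) (by norm_num; omega) (by norm_num; omega)]
      norm_num
    by_cases c9 : (512 : Int) < d
    · rw [TARGET_SIZES, pv_scan_step, if_neg (by omega), pv_scan_step, if_neg (by omega), pv_scan_step, if_neg (by omega), pv_scan_step, if_pos (by omega),
          pv_bitFit_interval (k := 9) (by norm_num) (by norm_num; omega) (by norm_num; omega)]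
      norm_num
    by_cases c8 : (256 : Int) < d
    · rw [TARGET_SIZES, pv_scan_step, if_neg (by omega), pv_scan_step, if_neg (by omega), pv_scan_step, if_neg (by omega), pv_scan_step, if_neg (by omega), pv_scan_step, if_pos (by omega),
          pv_bitFit_interval (k := 8) (by norm_num) (by norm_num; omega) (by norm_num; omega)]
      norm_num
    by_cases c7 : (128 : Int) < d
    · rw [TARGET_SIZES, pv_scan_step, if_neg (by omega), pv_scan_step, if_neg (by omega), pv_scan_step, if_neg (by omega), pv_scan_step, if_neg (by omega), pv_scan_step, if_neg (by omega), pv_scan_step, if_pos (by omega),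
          pv_bitFit_interval (k := 7) (by norm_num) (by norm_num; omega) (by norm_num; omega)]
      norm_num
    by_cases c6 : (64 : Int) < d
    · rw [TARGET_SIZES, pv_scan_step, if_neg (by omega), pv_scan_step, if_neg (by omega), pv_scan_step, if_neg (by omega), pv_scan_step, if_neg (by omega), pv_scan_step, if_neg (by omega), pv_scan_step, if_neg (by omega), pv_scan_step, if_pos (by omega),
          pv_bitFit_interval (k := 6) (by norm_num) (by norm_num; omega) (by norm_num; omega)]
      norm_num
    by_cases c5 : (32 : Int) < d
    · rw [TARGET_SIZES, pv_scan_step, if_neg (by omega), pv_scan_step, if_neg (by omega), pv_scan_step, if_neg (by omega), pv_scan_step, if_neg (by omega), pv_scan_step, if_neg (by omega), pv_scan_step, if_neg (by omega), pv_scan_step, if_neg (by omega), pv_scan_step, if_pos (by omega),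
          pv_bitFit_interval (k := 5) (by norm_num) (by norm_num; omega) (by norm_num; omega)]
      norm_num
    by_cases c4 : (16 : Int) < d
    · rw [TARGET_SIZES, pv_scan_step, if_neg (by omega), pv_scan_step, if_neg (by omega), pv_scan_step, if_neg (by omega), pv_scan_step, if_neg (by omega), pv_scan_step, if_neg (by omega), pv_scan_step, if_neg (by omega), pv_scan_step, if_neg (by omega), pv_scan_step, if_neg (by omega), pv_scan_step, if_pos (by omega),
          pv_bitFit_interval (k := 4) (by norm_num) (by norm_num; omega) (by norm_num; omega)]
      norm_num
    by_cases c3 : (8 : Int) < d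
    · rw [TARGET_SIZES, pv_scan_step, if_neg (by omega), pv_scan_step, if_neg (by omega), pv_scan_step, if_neg (by omega), pv_scan_step, if_neg (by omega), pv_scan_step, if_neg (by omega), pv_scan_step, if_neg (by omega), pv_scan_step, if_neg (by omega), pv_scan_step, if_neg (by omega), pv_scan_step, if_neg (by omega), pv_scan_step, if_pos (by omega),
          pv_bitFit_interval (k := 3) (by norm_num) (by norm_num; omega) (by norm_num; omega)]
      norm_num
    by_cases c2 : (4 : Int) < d
    · rw [TARGET_SIZES, pv_scan_step, if_neg (by omega), pv_scan_step, if_neg (by omega), pv_scan_step, if_neg (by omega), pv_scan_step, if_neg (by omega), pv_scan_step, if_neg (by omega), pv_scan_step, if_neg (by omega), pv_scan_step, if_neg (by omega), pv_scan_step, if_neg (by omega), pv_scan_step, if_neg (by omega), pv_scan_step, if_neg (by omega), pv_scan_step, if_pos (by omega),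
          pv_bitFit_interval (k := 2) (by norm_num) (by norm_num; omega) (by norm_num; omega)]
      norm_num
    by_cases c1 : (2 : Int) < d
    · rw [TARGET_SIZES, pv_scan_step, if_neg (by omega), pv_scan_step, if_neg (by omega), pv_scan_step, if_neg (by omega), pv_scan_step, if_neg (by omega), pv_scan_step, if_neg (by omega), pv_scan_step, if_neg (by omega), pv_scan_step, if_neg (by omega), pv_scan_step, if_neg (by omega), pv_scan_step, if_neg (by omega), pv_scan_step, if_neg (by omega), pv_scan_step, if_neg (by omega), pv_scan_step, if_pos (by omega),
          pv_bitFit_interval (k := 1) (by norm_num) (by norm_num; omega) (by norm_num; omega)]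
      norm_num
    by_cases c0 : (1 : Int) < d
    · rw [TARGET_SIZES, pv_scan_step, if_neg (by omega), pv_scan_step, if_neg (by omega), pv_scan_step, if_neg (by omega), pv_scan_step, if_neg (by omega), pv_scan_step, if_neg (by omega), pv_scan_step, if_neg (by omega), pv_scan_step, if_neg (by omega), pv_scan_step, if_neg (by omega), pv_scan_step, if_neg (by omega), pv_scan_step, if_neg (by omega), pv_scan_step, if_neg (by omega), pv_scan_step, if_neg (by omega), pv_scan_step, if_pos (by omega),
          pv_bitFit_interval (k := 0) (by norm_num) (by norm_num; omega) (by norm_num; omega)]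
      norm_num
    exfalso; omega
  · -- d ≤ 1 or d > 8192: no table pair matches and B's guard fails
    rw [TARGET_SIZES, pv_scan_step, if_neg (by omega), pv_scan_step, if_neg (by omega), pv_scan_step, if_neg (by omega), pv_scan_step, if_neg (by omega), pv_scan_step, if_neg (by omega), pv_scan_step, if_neg (by omega), pv_scan_step, if_neg (by omega), pv_scan_step, if_neg (by omega), pv_scan_step, if_neg (by omega), pv_scan_step, if_neg (by omega), pv_scan_step, if_neg (by omega), pv_scan_step, if_neg (by omega), pv_scan_step, if_neg (by omega), pv_scan_last, pvBitFit, if_neg hmid]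

-- ===== VERDICT (by name: the statement is the Claim_ definition above) =====
theorem find_fit_size_power_of_2_spec : Claim_equal_find_fit_size_power_of_2 := by
  intro size force_square _
  unfold Spec_find_fit_size_power_of_2 find_fit_size_power_of_2 find_fit_size_power_of_2_alt
  simp only [pv_fit_eq]
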